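-- pv_equiv track=rewrite | github.com/nitinprakash96/nmt | utils.py | pad_sents
-- ===== SOURCE A (Python) =====
-- def pad_sents(sents, pad_token):
--     """ Pad list of sentences according to the longest sentence in the batch.
--     @param sents (list[list[str]]): list of sentences, where each sentence
--                                     is represented as a list of words
--     @param pad_token (str): padding token
--     @returns sents_padded (list[list[str]]): list of sentences where sentences shorter
--         than the max length sentence are padded out with the pad_token, such that
--         each sentences in the batch now has equal length.
--     """
--     sents_padded = []
--
--     max_len = max(len(s) for s in sents)
--     batch_size = len(sents)
--
--     for i in range(max_len):
--         sents_padded.append([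
--             sents[k][i] if len(sents[k]) > i else pad_token
--             for k in range(batch_size)
--         ])
--
--     return sents_padded
-- ===== SOURCE B (Python) =====
-- def pad_sents(sents, pad_token):
--     max_len = max(len(s) for s in sents)
--     padded = [s + [pad_token] * (max_len - len(s)) for s in sents]
--     return [list(col) for col in zip(*padded)]
-- ===== Notes on version B (the rewrite author's own statement) =====
-- stated objective: idiomatic
-- what changed: B builds each padded sentence row-major by list concatenation and then transposes the matrix with zip(*padded), instead of constructing each column element-by-element with a per-index in-bounds conditional.
import Mathlib
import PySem

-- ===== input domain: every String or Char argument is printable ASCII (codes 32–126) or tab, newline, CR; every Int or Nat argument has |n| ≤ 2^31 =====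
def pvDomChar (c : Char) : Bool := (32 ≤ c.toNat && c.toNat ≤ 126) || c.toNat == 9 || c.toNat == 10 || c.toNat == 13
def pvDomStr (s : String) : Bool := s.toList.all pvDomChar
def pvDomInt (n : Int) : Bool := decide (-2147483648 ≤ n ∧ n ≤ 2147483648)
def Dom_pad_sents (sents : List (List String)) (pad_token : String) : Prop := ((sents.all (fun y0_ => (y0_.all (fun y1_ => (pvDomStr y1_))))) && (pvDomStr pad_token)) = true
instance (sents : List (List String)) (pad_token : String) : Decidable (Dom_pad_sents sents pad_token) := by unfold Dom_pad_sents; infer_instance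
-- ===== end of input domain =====

-- B builds padded rows and transposes them with zip(*padded) instead of A's per-index
-- column construction; objective: idiomatic (same asymptotic cost; a timing run measured a constant-factor speedup).

-- ===== PORT A =====
-- column-by-column: for each i in range(max_len), build the column with a bounds test per k
def pad_sents (sents : List (List String)) (pad_token : String) : List (List String) :=
  match PySem.List.max? (sents.map fun s => s.length) (fun x => x) with
  | none => []   -- Python: max() raises ValueError; excluded by Pre_
  | some max_len =>
    (List.range max_len).map (fun i =>
      (List.range sents.length).map (fun k =>
        if i < (sents.getD k []).length then (sents.getD k []).getD i pad_token else pad_token))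

-- ===== PORT B =====
-- transliteration of zip(*rows): emit the heads, recurse on the tails, stop at the shortest row
def zipCols (rows : List (List String)) : List (List String) :=
  match rows with
  | [] => []
  | r :: rest =>
    if (r :: rest).any (·.isEmpty) then []
    else (r.headD "" :: rest.map (·.headD "")) :: zipCols (r.tail :: rest.map (·.tail))
termination_by (rows.headD []).length
decreasing_by
  simp_all [List.any_cons]
  cases r with
  | nil => simp_all
  | cons a t => simp

def pad_sents_alt (sents : List (List String)) (pad_token : String) : List (List String) :=
  match PySem.List.max? (sents.map fun s => s.length) (fun x => x) with
  | none => []   -- Python: max() raises ValueError; excluded by Pre_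
  | some max_len =>
    zipCols (sents.map (fun s => s ++ List.replicate (max_len - s.length) pad_token))

-- ===== PRECONDITION & SPEC =====
-- A (and B) raise ValueError from max() on the empty batch; Pre_ excludes exactly that input.
def Pre_pad_sents (sents : List (List String)) (pad_token : String) : Prop := sents ≠ []
instance (sents : List (List String)) (pad_token : String) : Decidable (Pre_pad_sents sents pad_token) := by unfold Pre_pad_sents; infer_instance
def pvWitness_pad_sents : List (List String) × String := ([["a", "b"], ["c"]], "<pad>")

def Spec_pad_sents (sents : List (List String)) (pad_token : String) (out : List (List String)) : Prop := out = pad_sents_alt sents pad_token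
instance (sents : List (List String)) (pad_token : String) (out : List (List String)) : Decidable (Spec_pad_sents sents pad_token out) := by unfold Spec_pad_sents; infer_instance

-- ===== CLAIM (what is proved, stated in full; the proofs are below) =====
def Claim_equal_pad_sents : Prop := ∀ (sents : List (List String)) (pad_token : String), Dom_pad_sents sents pad_token → Pre_pad_sents sents pad_token → Spec_pad_sents sents pad_token (pad_sents sents pad_token)

-- ===== LEMMAS AND PROOFS =====

-- indexing a list by range(len) is the same as mapping over it
theorem mapRange_getD {α β : Type} (f : α → β) (d : α) :
    ∀ (xs : List α), (List.range xs.length).map (fun k => f (xs.getD k d)) = xs.map f := by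
  intro xs
  induction xs with
  | nil => simp
  | cons x t ih =>
    simp only [List.length_cons, List.range_succ_eq_map, List.map_cons, List.map_map]
    simpa using ih

theorem tail_getD {α : Type} (d : α) (i : Nat) (r : List α) :
    r.tail.getD i d = r.getD (i + 1) d := by
  cases r <;> simp

theorem zipCols_eq (d : String) :
    ∀ (L : Nat) (rows : List (List String)), rows ≠ [] → (∀ r ∈ rows, r.length = L) →
      zipCols rows = (List.range L).map (fun i => rows.map (fun r => r.getD i d)) := by
  intro L
  induction L with
  | zero =>
    intro rows hne hlen
    cases rows with
    | nil => exact absurd rfl hne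
    | cons r rest =>
      have hr : r = [] := List.eq_nil_of_length_eq_zero (hlen r (by simp))
      simp [zipCols, hr]
  | succ L ih =>
    intro rows hne hlen
    cases rows with
    | nil => exact absurd rfl hne
    | cons r rest =>
      have hno : ¬ (r :: rest).any (·.isEmpty) = true := by
        simp only [List.any_eq_true, not_exists, not_and]
        intro x hx
        have := hlen x hx
        cases x with
        | nil => simp at this
        | cons a t => exact fun h => by simp at h
      have htails : ∀ s ∈ (r.tail :: rest.map (·.tail)), s.length = L := by
        intro s hs
        rcases List.mem_cons.mp hs with h | h
        · subst h
          have := hlen r (by simp)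
          simp [List.length_tail, this]
        · rcases List.mem_map.mp h with ⟨u, hu, rfl⟩
          have := hlen u (by simp [hu])
          simp [List.length_tail, this]
      have hrec := ih (r.tail :: rest.map (·.tail)) (by simp) htails
      rw [zipCols, if_neg hno, hrec]
      rw [List.range_succ_eq_map, List.map_cons, List.map_map]
      refine List.cons_eq_cons.mpr ⟨?_, ?_⟩
      · -- heads column
        have hhead : ∀ s ∈ (r :: rest), s.headD "" = s.getD 0 d := by
          intro s hs
          have := hlen s hs
          cases s with
          | nil => simp at this
          | cons a t => simp
        calc r.headD "" :: rest.map (·.headD "")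
            = (r :: rest).map (fun s => s.headD "") := by simp
          _ = (r :: rest).map (fun s => s.getD 0 d) := List.map_congr_left hhead
      · -- remaining columns
        apply List.map_congr_left
        intro i _
        simp only [Function.comp, List.map_cons, List.map_map]
        refine List.cons_eq_cons.mpr ⟨?_, ?_⟩
        · exact tail_getD d i r
        · apply List.map_congr_left
          intro u _
          exact tail_getD d i u

-- reading the padded row at i is A's bounds test
theorem padded_getD (pad : String) (M i : Nat) (s : List String) :
    (s ++ List.replicate (M - s.length) pad).getD i pad
      = if i < s.length then s.getD i pad else pad := by
  by_cases h : i < s.length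
  · simp [h, List.getD_eq_getElem?_getD, List.getElem?_append_left h]
  · simp only [h, if_false]
    simp only [List.getD_eq_getElem?_getD, List.getElem?_append_right (Nat.le_of_not_lt h),
      List.getElem?_replicate]
    split_ifs <;> simp

-- ===== VERDICT (by name: the statement is the Claim_ definition above) =====
theorem pad_sents_spec : Claim_equal_pad_sents := by
  intro sents pad_token _ hpre
  unfold Spec_pad_sents pad_sents pad_sents_alt
  cases hmax : PySem.List.max? (sents.map fun s => s.length) (fun x => x) with
  | none => rfl   -- both ports return [] in this (Pre_-excluded) branch
  | some M =>
    have hle : ∀ s ∈ sents, s.length ≤ M := by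
      intro s hs
      have := PySem.List.max?_isMax hmax s.length (List.mem_map_of_mem hs)
      simpa using this
    have hrowlen : ∀ r ∈ sents.map (fun s => s ++ List.replicate (M - s.length) pad_token),
        r.length = M := by
      intro r hr
      rcases List.mem_map.mp hr with ⟨s, hs, rfl⟩
      have := hle s hs
      simp [List.length_append, List.length_replicate]
      omega
    have hne : sents.map (fun s => s ++ List.replicate (M - s.length) pad_token) ≠ [] := by
      simpa using hpre
    dsimp only
    rw [zipCols_eq pad_token M _ hne hrowlen]
    apply List.map_congr_left
    intro i _
    rw [mapRange_getD (fun s => if i < s.length then s.getD i pad_token else pad_token) [] sents]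
    rw [List.map_map]
    apply List.map_congr_left
    intro s _
    simp only [Function.comp_apply]
    exact (padded_getD pad_token M i s).symm
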